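-- pv_equiv track=rewrite | github.com/jparry67/crypto-pals-challenges | set1-basics/crypto_utils.py | score_string_validity
-- ===== SOURCE A (Python) =====
-- def score_string_validity(string):
--   score = 0
--   for char in string:
--     if char in "aeiouAEIOU":
--       score += 4
--       if char.islower():
--         score += 1
--     elif char.isalpha():
--       score += 3
--       if char.islower():
--         score += 1
--     elif char.isspace():
--       score += 2
--     elif char in "\"'{}()_-,.!":
--       score += 1
--   return score
-- ===== SOURCE B (Python) =====
-- def _weight(char):
--   if char in "aeiouAEIOU":
--     return 5 if char.islower() else 4
--   if char.isalpha():
--     return 4 if char.islower() else 3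
--   if char.isspace():
--     return 2
--   if char in "\"'{}()_-,.!":
--     return 1
--   return 0
--
--
-- def score_string_validity(string):
--   counts = {}
--   for char in string:
--     counts[char] = counts.get(char, 0) + 1
--   return sum(count * _weight(char) for char, count in counts.items())
-- ===== Notes on version B (the rewrite author's own statement) =====
-- stated objective: alternative
-- what changed: B builds a character-frequency dict in one pass and returns the sum of count x weight over the distinct characters via a per-character weight function, instead of A's running branch-and-accumulate per position.
import Mathlib
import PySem

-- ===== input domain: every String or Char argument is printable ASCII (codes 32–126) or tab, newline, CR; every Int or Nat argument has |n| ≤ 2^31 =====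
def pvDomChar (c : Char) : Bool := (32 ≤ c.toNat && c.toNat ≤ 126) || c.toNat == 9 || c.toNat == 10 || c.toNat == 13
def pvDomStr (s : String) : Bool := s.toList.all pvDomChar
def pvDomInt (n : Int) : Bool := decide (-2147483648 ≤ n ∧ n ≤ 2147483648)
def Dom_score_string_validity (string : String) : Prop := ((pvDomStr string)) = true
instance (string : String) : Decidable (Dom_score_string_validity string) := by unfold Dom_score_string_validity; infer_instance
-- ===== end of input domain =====

-- B groups the string by distinct character (a hand-built counter dict) and sums count × weight,
-- instead of A's per-position branch accumulation; objective: alternative decomposition, same cost.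

-- ===== PORT A =====
def score_string_validity (string : String) : Int :=
  string.toList.foldl (fun score char =>
    if PySem.Chars.isIn [char] "aeiouAEIOU".toList then
      let score := score + 4
      if PySem.Chars.islower char then score + 1 else score
    else if PySem.Chars.isalpha char then
      let score := score + 3
      if PySem.Chars.islower char then score + 1 else score
    else if PySem.Chars.isspace char then
      score + 2
    else if PySem.Chars.isIn [char] "\"'{}()_-,.!".toList then
      score + 1
    else score) 0

-- ===== PORT B =====
def pvWeight (char : Char) : Int :=
  if PySem.Chars.isIn [char] "aeiouAEIOU".toList then
    if PySem.Chars.islower char then 5 else 4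
  else if PySem.Chars.isalpha char then
    if PySem.Chars.islower char then 4 else 3
  else if PySem.Chars.isspace char then 2
  else if PySem.Chars.isIn [char] "\"'{}()_-,.!".toList then 1
  else 0

def score_string_validity_alt (string : String) : Int :=
  let counts : PySem.Dict Char Int :=
    string.toList.foldl (fun d char => d.insert char (d.getD char 0 + 1)) PySem.Dict.empty
  (counts.items.map (fun p => p.2 * pvWeight p.1)).sum

-- ===== PRECONDITION & SPEC =====
def Spec_score_string_validity (string : String) (out : Int) : Prop := out = score_string_validity_alt string
instance (string : String) (out : Int) : Decidable (Spec_score_string_validity string out) := by unfold Spec_score_string_validity; infer_instance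

-- ===== CLAIM (what is proved, stated in full; the proofs are below) =====
def Claim_equal_score_string_validity : Prop := ∀ (string : String), Dom_score_string_validity string → Spec_score_string_validity string (score_string_validity string)

-- ===== LEMMAS AND PROOFS =====

-- summing w over a nodup index list that covers l, weighted by multiplicities, is summing w over l
lemma pv_sum_if_single (w : Char → Int) (a : Char) (d : List Char) (hd : d.Nodup) (ha : a ∈ d) :
    (d.map (fun k => if k = a then w k else 0)).sum = w a := by
  induction d with
  | nil => cases ha
  | cons x t ih =>
    simp only [List.map_cons, List.sum_cons]
    by_cases hxa : x = a
    · have hnt : a ∉ t := hxa ▸ (List.nodup_cons.mp hd).1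
      have hz : (t.map (fun k => if k = a then w k else 0)).sum = 0 := by
        apply List.sum_eq_zero
        intro y hy
        rcases List.mem_map.mp hy with ⟨k, hk, rfl⟩
        have hne : k ≠ a := fun e => hnt (e ▸ hk)
        simp [hne]
      rw [if_pos hxa, hz, hxa]
      ring
    · have hat : a ∈ t := (List.mem_cons.mp ha).resolve_left (fun e => hxa e.symm)
      rw [if_neg hxa, ih (List.nodup_cons.mp hd).2 hat]
      ring

lemma pv_sum_counts (w : Char → Int) (d : List Char) (hd : d.Nodup) :
    ∀ l : List Char, (∀ x ∈ l, x ∈ d) →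
      (d.map (fun k => (l.count k : Int) * w k)).sum = (l.map w).sum := by
  intro l
  induction l with
  | nil => intro _; simp
  | cons a t ih =>
    intro hsub
    have h1 : (d.map (fun k => ((a :: t).count k : Int) * w k)) =
        d.map (fun k => (t.count k : Int) * w k + (if k = a then w k else 0)) := by
      apply List.map_congr_left
      intro k _
      by_cases h : k = a
      · subst h; simp; ring
      · have hb : (a == k) = false := beq_false_of_ne (fun e => h e.symm)
        rw [List.count_cons, hb, if_neg h]
        push_cast; ring
    rw [h1, List.sum_map_add, ih (fun x hx => hsub x (List.mem_cons_of_mem a hx)),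
        pv_sum_if_single w a d hd (hsub a (List.mem_cons_self ..))]
    rw [List.map_cons, List.sum_cons]; ring

-- A's loop body adds exactly pvWeight of the character
lemma pv_A_eq_sum (l : List Char) :
    l.foldl (fun score char =>
      if PySem.Chars.isIn [char] "aeiouAEIOU".toList then
        let score := score + 4
        if PySem.Chars.islower char then score + 1 else score
      else if PySem.Chars.isalpha char then
        let score := score + 3
        if PySem.Chars.islower char then score + 1 else score
      else if PySem.Chars.isspace char then
        score + 2
      else if PySem.Chars.isIn [char] "\"'{}()_-,.!".toList then
        score + 1
      else score) 0 = (l.map pvWeight).sum := by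
  have h : ∀ (acc : Int) (c : Char),
      (if PySem.Chars.isIn [c] "aeiouAEIOU".toList then
        let s := acc + 4
        if PySem.Chars.islower c then s + 1 else s
      else if PySem.Chars.isalpha c then
        let s := acc + 3
        if PySem.Chars.islower c then s + 1 else s
      else if PySem.Chars.isspace c then acc + 2
      else if PySem.Chars.isIn [c] "\"'{}()_-,.!".toList then acc + 1
      else acc) = acc + pvWeight c := by
    intro acc c
    unfold pvWeight
    split_ifs <;> simp <;> ring
  rw [PySem.List.foldl_congr_mem l _ (fun acc c => acc + pvWeight c) 0
        (fun acc x _ => h acc x), PySem.List.foldl_add]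
  simp

-- ===== VERDICT (by name: the statement is the Claim_ definition above) =====
theorem score_string_validity_spec : Claim_equal_score_string_validity := by
  intro s _
  unfold Spec_score_string_validity score_string_validity score_string_validity_alt
  simp only []
  rw [PySem.Dict.foldl_insert_getD_add_one_eq_counter, PySem.Dict.items_counter]
  rw [pv_A_eq_sum, List.map_map]
  have := pv_sum_counts pvWeight (PySem.Set.ofList s.toList)
    (PySem.Set.nodup_ofList s.toList) s.toList
    (fun x hx => (PySem.Set.mem_ofList s.toList x).mpr hx)
  rw [← this]
  rfl
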